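-- pv_equiv track=rewrite | github.com/hw-sw-contracts/revizor | src/dependency_tracking.py | desugarRegister
-- ===== SOURCE A (Python) =====
-- def desugarRegister(reg:str) -> str:
--     if reg == "PC":
--         return reg
--     for i in {"A","B","C","D"}:
--         if reg in {f"{i}L", f"{i}H", f"{i}X", f"E{i}X", f"R{i}X"}:
--             return f"R{i}X"
--     for i in {"BP","SI","DI","SP", "IP"}:
--         if reg in {f"{i}L", f"{i}", f"E{i}", f"R{i}"}:
--             return f"R{i}"
--     for i in range(8,16):
--         if reg in {f"R{i}B", f"R{i}W", f"R{i}D", f"R{i}"}: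
--             return f"R{i}"
-- ===== SOURCE B (Python) =====
-- # Alias table: every x86 register alias mapped once to its canonical 64-bit name;
-- # the function is a single dict lookup (returns None for unknown registers, like A).
-- _CANON = {
--     "AL": "RAX",
--     "AH": "RAX",
--     "AX": "RAX",
--     "EAX": "RAX",
--     "RAX": "RAX",
--     "BL": "RBX",
--     "BH": "RBX",
--     "BX": "RBX",
--     "EBX": "RBX",
--     "RBX": "RBX",
--     "CL": "RCX",
--     "CH": "RCX",
--     "CX": "RCX",
--     "ECX": "RCX",
--     "RCX": "RCX",
--     "DL": "RDX",
--     "DH": "RDX",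
--     "DX": "RDX",
--     "EDX": "RDX",
--     "RDX": "RDX",
--     "BPL": "RBP",
--     "BP": "RBP",
--     "EBP": "RBP",
--     "RBP": "RBP",
--     "SIL": "RSI",
--     "SI": "RSI",
--     "ESI": "RSI",
--     "RSI": "RSI",
--     "DIL": "RDI",
--     "DI": "RDI",
--     "EDI": "RDI",
--     "RDI": "RDI",
--     "SPL": "RSP",
--     "SP": "RSP",
--     "ESP": "RSP",
--     "RSP": "RSP",
--     "IPL": "RIP",
--     "IP": "RIP",
--     "EIP": "RIP",
--     "RIP": "RIP",
--     "R8B": "R8",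
--     "R8W": "R8",
--     "R8D": "R8",
--     "R8": "R8",
--     "R9B": "R9",
--     "R9W": "R9",
--     "R9D": "R9",
--     "R9": "R9",
--     "R10B": "R10",
--     "R10W": "R10",
--     "R10D": "R10",
--     "R10": "R10",
--     "R11B": "R11",
--     "R11W": "R11",
--     "R11D": "R11",
--     "R11": "R11",
--     "R12B": "R12",
--     "R12W": "R12",
--     "R12D": "R12",
--     "R12": "R12",
--     "R13B": "R13",
--     "R13W": "R13",
--     "R13D": "R13",
--     "R13": "R13",
--     "R14B": "R14",
--     "R14W": "R14",
--     "R14D": "R14",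
--     "R14": "R14",
--     "R15B": "R15",
--     "R15W": "R15",
--     "R15D": "R15",
--     "R15": "R15",
--     "PC": "PC",
-- }
--
--
-- def desugarRegister(reg: str) -> str:
--     return _CANON.get(reg)
-- ===== Notes on version B (the rewrite author's own statement) =====
-- stated objective: simpler
-- what changed: Replaces A's three alias-set scan loops (plus the PC special case) with one precomputed alias-to-canonical dict and a single .get lookup.
import Mathlib
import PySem

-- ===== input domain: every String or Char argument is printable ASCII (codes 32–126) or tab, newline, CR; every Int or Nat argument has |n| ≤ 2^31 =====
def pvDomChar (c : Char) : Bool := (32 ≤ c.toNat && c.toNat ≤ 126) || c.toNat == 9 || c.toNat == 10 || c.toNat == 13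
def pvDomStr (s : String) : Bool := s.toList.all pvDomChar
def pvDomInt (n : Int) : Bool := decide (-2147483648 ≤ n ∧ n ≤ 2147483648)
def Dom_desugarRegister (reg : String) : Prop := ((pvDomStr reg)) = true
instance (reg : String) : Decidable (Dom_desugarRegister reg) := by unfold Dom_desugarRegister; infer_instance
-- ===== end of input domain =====

-- B replaces A's three alias-set scan loops by one precomputed alias→canonical table and a single lookup (objective: simpler).

-- ===== PORT A =====
-- loop `for i in {"A","B","C","D"}` (the result does not depend on the set's iteration order: the alias sets are disjoint)
def loopGP : List String → String → Option String
  | [], _ => none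
  | i :: rest, reg =>
      if [i ++ "L", i ++ "H", i ++ "X", "E" ++ i ++ "X", "R" ++ i ++ "X"].contains reg
      then some ("R" ++ i ++ "X") else loopGP rest reg

-- loop `for i in {"BP","SI","DI","SP","IP"}`
def loopSP : List String → String → Option String
  | [], _ => none
  | i :: rest, reg =>
      if [i ++ "L", i, "E" ++ i, "R" ++ i].contains reg
      then some ("R" ++ i) else loopSP rest reg

-- loop `for i in range(8,16)`
def loopNum : List Int → String → Option String
  | [], _ => none
  | i :: rest, reg =>
      if ["R" ++ PySem.Int.toStr i ++ "B", "R" ++ PySem.Int.toStr i ++ "W",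
          "R" ++ PySem.Int.toStr i ++ "D", "R" ++ PySem.Int.toStr i].contains reg
      then some ("R" ++ PySem.Int.toStr i) else loopNum rest reg

def desugarRegister (reg : String) : Option String :=
  if reg == "PC" then some reg
  else match loopGP ["A", "B", "C", "D"] reg with
    | some r => some r
    | none => match loopSP ["BP", "SI", "DI", "SP", "IP"] reg with
      | some r => some r
      | none => loopNum (PySem.List.pyRange 8 16 1) reg

-- ===== PORT B =====
def canonTable : PySem.Dict String String := PySem.Dict.mk [("AL", "RAX"), ("AH", "RAX"), ("AX", "RAX"), ("EAX", "RAX"), ("RAX", "RAX"), ("BL", "RBX"), ("BH", "RBX"), ("BX", "RBX"), ("EBX", "RBX"), ("RBX", "RBX"), ("CL", "RCX"), ("CH", "RCX"), ("CX", "RCX"), ("ECX", "RCX"), ("RCX", "RCX"), ("DL", "RDX"), ("DH", "RDX"), ("DX", "RDX"), ("EDX", "RDX"), ("RDX", "RDX"), ("BPL", "RBP"), ("BP", "RBP"), ("EBP", "RBP"), ("RBP", "RBP"), ("SIL", "RSI"), ("SI", "RSI"), ("ESI", "RSI"), ("RSI", "RSI"), ("DIL", "RDI"), ("DI", "RDI"),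 ("EDI", "RDI"), ("RDI", "RDI"), ("SPL", "RSP"), ("SP", "RSP"), ("ESP", "RSP"), ("RSP", "RSP"), ("IPL", "RIP"), ("IP", "RIP"), ("EIP", "RIP"), ("RIP", "RIP"), ("R8B", "R8"), ("R8W", "R8"), ("R8D", "R8"), ("R8", "R8"), ("R9B", "R9"), ("R9W", "R9"), ("R9D", "R9"), ("R9", "R9"), ("R10B", "R10"), ("R10W", "R10"), ("R10D", "R10"), ("R10", "R10"), ("R11B", "R11"), ("R11W", "R11"), ("R11D", "R11"), ("R11", "R11"), ("R12B", "R12"), ("R12W", "R12"), ("R12D", "R12"), ("R12", "R12"), ("R13B", "R13"), ("R13W", "R13"), ("R13D", "R13"), ("R13", "R13"), ("R14B", "R14"), ("R14W", "R14"), ("R14D", "R14"), ("R14", "R14"), ("R15B", "R15"), ("R15W", "R15"), ("R15D", "R15"), ("R15", "R15"), ("PC", "PC")]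

def desugarRegister_alt (reg : String) : Option String := canonTable.get? reg

-- ===== PRECONDITION & SPEC =====
def Spec_desugarRegister (reg : String) (out : Option String) : Prop := out = desugarRegister_alt reg
instance (reg : String) (out : Option String) : Decidable (Spec_desugarRegister reg out) := by unfold Spec_desugarRegister; infer_instance

-- ===== CLAIM (what is proved, stated in full; the proofs are below) =====
def Claim_equal_desugarRegister : Prop := ∀ (reg : String), Dom_desugarRegister reg → Spec_desugarRegister reg (desugarRegister reg)

-- ===== LEMMAS AND PROOFS =====

-- all 73 register aliases either program recognises
def keys73 : List String := ["AL", "AH", "AX", "EAX", "RAX", "BL", "BH", "BX", "EBX", "RBX", "CL", "CH", "CX", "ECX", "RCX", "DL", "DH", "DX", "EDX", "RDX", "BPL", "BP", "EBP", "RBP", "SIL", "SI", "ESI", "RSI", "DIL", "DI", "EDI", "RDI", "SPL", "SP", "ESP", "RSP", "IPL", "IP", "EIP", "RIP", "R8B", "R8W", "R8D", "R8", "R9B", "R9W", "R9D", "R9", "R10B", "R10W", "R10D", "R10", "R11B", "R11W", "R11D", "R11", "R12B", "R12W", "R12D", "R12", "R13B", "R13W", "R13D", "R13", "R14B", "R14W",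 "R14D", "R14", "R15B", "R15W", "R15D", "R15", "PC"]

theorem contains_false_of_not_mem {l : List String} {reg : String}
    (h : reg ∉ keys73) (hsub : ∀ s ∈ l, s ∈ keys73) : l.contains reg = false := by
  cases hc : l.contains reg with
  | false => rfl
  | true => exact absurd (hsub reg (by simpa using hc)) h

theorem loopGP_none (l : List String) (reg : String)
    (h : ∀ i ∈ l, ([i ++ "L", i ++ "H", i ++ "X", "E" ++ i ++ "X", "R" ++ i ++ "X"].contains reg) = false) :
    loopGP l reg = none := by
  induction l with
  | nil => rfl
  | cons i rest ih =>
      simp only [loopGP, h i (List.mem_cons_self ..)]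
      exact ih fun j hj => h j (List.mem_cons_of_mem _ hj)

theorem loopSP_none (l : List String) (reg : String)
    (h : ∀ i ∈ l, ([i ++ "L", i, "E" ++ i, "R" ++ i].contains reg) = false) :
    loopSP l reg = none := by
  induction l with
  | nil => rfl
  | cons i rest ih =>
      simp only [loopSP, h i (List.mem_cons_self ..)]
      exact ih fun j hj => h j (List.mem_cons_of_mem _ hj)

theorem loopNum_none (l : List Int) (reg : String)
    (h : ∀ i ∈ l, (["R" ++ PySem.Int.toStr i ++ "B", "R" ++ PySem.Int.toStr i ++ "W",
        "R" ++ PySem.Int.toStr i ++ "D", "R" ++ PySem.Int.toStr i].contains reg) = false) :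
    loopNum l reg = none := by
  induction l with
  | nil => rfl
  | cons i rest ih =>
      simp only [loopNum, h i (List.mem_cons_self ..)]
      exact ih fun j hj => h j (List.mem_cons_of_mem _ hj)

theorem get?_none_of_not_mem (reg : String) (h : reg ∉ keys73) :
    canonTable.get? reg = none :=
  (PySem.Dict.get?_eq_none_iff_not_mem_keys canonTable reg).mpr
    ((show canonTable.keys = keys73 from rfl) ▸ h)

-- ===== VERDICT (by name: the statement is the Claim_ definition above) =====
theorem desugarRegister_spec : Claim_equal_desugarRegister := by
  intro reg _
  show desugarRegister reg = desugarRegister_alt reg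
  by_cases h : reg ∈ keys73
  · fin_cases h <;> rfl
  · have hPC : (reg == "PC") = false :=
      beq_eq_false_iff_ne.mpr fun e => h (by rw [e]; decide)
    have hGP : loopGP ["A", "B", "C", "D"] reg = none := by
      apply loopGP_none
      intro i hi
      fin_cases hi <;> exact contains_false_of_not_mem h (by decide)
    have hSP : loopSP ["BP", "SI", "DI", "SP", "IP"] reg = none := by
      apply loopSP_none
      intro i hi
      fin_cases hi <;> exact contains_false_of_not_mem h (by decide)
    have hNum : loopNum (PySem.List.pyRange 8 16 1) reg = none := by
      apply loopNum_none
      intro i hi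
      fin_cases hi <;> exact contains_false_of_not_mem h (by decide)
    have hB : desugarRegister_alt reg = none := get?_none_of_not_mem reg h
    simp only [desugarRegister, hPC, Bool.false_eq_true, if_false, hGP, hSP, hNum, hB]
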